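-- pv_equiv track=rewrite | github.com/kurtrm/code-katas | src/jewels_and_stones.py | altalt
-- ===== SOURCE A (Python) =====
-- from collections import Counter
--
-- def altalt(J, S):
--     """
--     """
--     counts = Counter(S)
--     total = 0
--     for jewel in J:
--         try:
--             total += counts[jewel]
--         except KeyError:
--             continue
--
--     return total
-- ===== SOURCE B (Python) =====
-- from collections import Counter
--
-- def altalt(J, S):
--     cS = Counter(S)
--     cJ = Counter(J)
--     return sum(cS[c] * cJ[c] for c in cJ)
-- ===== Notes on version B (the rewrite author's own statement) =====
-- stated objective: alternative
-- what changed: Instead of scanning every character of J against one Counter(S), B builds frequency tables of both strings and sums cS[c]*cJ[c] over the distinct characters of J.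
import Mathlib
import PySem

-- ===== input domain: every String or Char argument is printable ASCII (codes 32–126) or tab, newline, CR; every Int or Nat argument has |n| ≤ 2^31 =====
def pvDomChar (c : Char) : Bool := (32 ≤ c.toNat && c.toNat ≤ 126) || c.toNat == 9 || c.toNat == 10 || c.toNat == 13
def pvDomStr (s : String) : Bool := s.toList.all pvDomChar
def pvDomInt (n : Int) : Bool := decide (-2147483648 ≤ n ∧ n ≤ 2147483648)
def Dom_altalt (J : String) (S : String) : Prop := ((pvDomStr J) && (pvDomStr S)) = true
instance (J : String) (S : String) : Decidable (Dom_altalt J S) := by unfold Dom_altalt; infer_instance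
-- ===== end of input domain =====

-- B replaces A's per-character scan of J against Counter(S) with two frequency
-- tables and a sum of products over the distinct characters of J (alternative
-- decomposition, same asymptotic cost).


-- ===== PORT A =====
-- counts = Counter(S); total = 0; for jewel in J: total += counts[jewel]
-- (Counter lookup never raises KeyError: a missing key yields 0, as getD 0 does)
def altalt (J : String) (S : String) : Int :=
  let counts := PySem.Dict.counter S.toList
  J.toList.foldl (fun total jewel => total + counts.getD jewel 0) 0

-- ===== PORT B =====
-- cS = Counter(S); cJ = Counter(J); return sum(cS[c] * cJ[c] for c in cJ)
def altalt_alt (J : String) (S : String) : Int :=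
  let cS := PySem.Dict.counter S.toList
  let cJ := PySem.Dict.counter J.toList
  (cJ.keys.map (fun c => cS.getD c 0 * cJ.getD c 0)).sum

-- ===== PRECONDITION & SPEC =====
def Spec_altalt (J : String) (S : String) (out : Int) : Prop := out = altalt_alt J S
instance (J : String) (S : String) (out : Int) : Decidable (Spec_altalt J S out) := by unfold Spec_altalt; infer_instance

-- ===== CLAIM (what is proved, stated in full; the proofs are below) =====
def Claim_equal_altalt : Prop := ∀ (J : String) (S : String), Dom_altalt J S → Spec_altalt J S (altalt J S)

-- ===== LEMMAS AND PROOFS =====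

-- Summing f over a list equals summing f c * (multiplicity of c) over its distinct elements.
theorem sum_map_eq_sum_dedup_mul_count (l : List Char) (f : Char → Int) :
    (l.map f).sum = ((PySem.Set.ofList l).map (fun c => f c * (l.count c : Int))).sum := by
  have h := Finset.sum_multiset_map_count (l : Multiset Char) f
  simp only [Multiset.map_coe, Multiset.sum_coe, Multiset.coe_count] at h
  rw [h, ← List.sum_toFinset _ (PySem.Set.nodup_ofList l)]
  have hfs : (PySem.Set.ofList l).toFinset = l.toFinset := by
    apply Finset.ext; intro c
    simp [PySem.Set.mem_ofList]
  rw [hfs]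
  apply Finset.sum_congr rfl
  intro c _
  rw [nsmul_eq_mul, mul_comm]

-- ===== VERDICT (by name: the statement is the Claim_ definition above) =====
theorem altalt_spec : Claim_equal_altalt := by
  intro J S _
  show altalt J S = altalt_alt J S
  unfold altalt altalt_alt
  simp only [PySem.List.foldl_add, PySem.Dict.getD_counter, PySem.Dict.keys_counter,
    zero_add]
  exact sum_map_eq_sum_dedup_mul_count J.toList (fun c => (S.toList.count c : Int))
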